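-- pv_equiv track=rewrite | github.com/tom38110/projet_Scrabble | prog.py | meilleurs_mots
-- ===== SOURCE A (Python) =====
-- def mot_jouable(mot,ll):
--     lltemp = list(ll) # création d'une liste temporaire pour ne pas modifier l'original qui est la main du joueur
--     possible = len(mot) <= len(ll) # vérifie que le mot est plus court que le nombre de jetons dans la main
--     nbe = 0 # initialisation du nombre d'erreur
--     for i in range(len(mot)): # boucle qui vérifie si chaque lettre du mot est dans la liste
--         possible = possible and mot[i] in lltemp
--         if mot[i] in lltemp: # si oui enlève la lettre en question dans la liste temporaire pour pas qu'elle soit réutilisée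
--             lltemp.remove(mot[i])
--         elif mot[i] not in lltemp: # si la lettre n'est pas dans la liste temporaire augmente le nombre d'erreur
--             nbe = nbe + 1
--     if nbe <= ll.count('?'): # si le nombre d'erreur est inférieur ou égal au nombre de joker dans la main du joueur alors le mot est jouable
--         possible = True and len(mot) <= len(ll) # on revérifie si le mot est plus court que la longueur de la main du joueur
--     return possible
--
-- def mots_jouables(motsfr,ll):
--     motsjouables = []
--     for e in motsfr: # e prend successivement la valeur de chaque mot dans la liste des mots jouables
--         if mot_jouable(e, ll): # si le mot est bien jouable à partir de la main du joueur on l'ajoute à la liste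
--             motsjouables.append(e)
--     return motsjouables
--
-- def valeur_mot(mot,dico):
--     val = 0
--     if len(mot) == 7: # si le mot a une longueur de 7 lettre rajoute direct 50 points
--         val = 50
--     for e in mot: # e prend successivement chaque lettre du mot
--         val = val + dico[e]['val'] # on rajoute la valeur de la lettre à la somme des valeurs de chaque lettre
--     return val
--
-- def meilleur_mot(motsfr,ll,dico):
--     result = ""
--     valmeilleurmot = 0
--     motsjouables = mots_jouables(motsfr, ll) # on récupère la liste des mots jouables
--     for mot in motsjouables: # on parcours chaque mot de cette liste
--         valmot = valeur_mot(mot, dico)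
--         if valmot > valmeilleurmot: # on vérifie si la valeur du mot est supérieur à celle du meilleur mot actuel
--             result = mot
--             valmeilleurmot = valmot
--     return result # si il n'y a aucun mot on renvoie une chaîne vide
--
-- def meilleurs_mots(motsfr,ll,dico):
--     res = []
--     meilleurmot = meilleur_mot(motsfr, ll, dico) # on récupère le meilleur mot jouable
--     if meilleurmot != "": # si il existe bien un meilleur mot on peut continuer
--         motsjouables = mots_jouables(motsfr, ll) # on récupère la liste des mots jouables
--         valmeilleurmot = valeur_mot(meilleurmot, dico)
--         for mot in motsjouables:
--             if valeur_mot(mot, dico) == valmeilleurmot: # on compare avec la valeur du meilleur mot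
--                 res.append(mot)
--     return res
-- ===== SOURCE B (Python) =====
-- def meilleurs_mots(motsfr, ll, dico):
--     # single pass: score each playable word once, track the running maximum
--     jokers = ll.count('?')
--     n = len(ll)
--     best = 0
--     scored = []
--     for mot in motsfr:
--         if len(mot) > n:
--             continue
--         missing = sum(max(0, mot.count(c) - ll.count(c)) for c in dict.fromkeys(mot))
--         if missing > jokers:
--             continue
--         val = sum(dico[c]['val'] for c in mot) + (50 if len(mot) == 7 else 0)
--         scored.append((mot, val))
--         if val > best:
--             best = val
--     return [m for m, v in scored if v == best] if best > 0 else []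
-- ===== Notes on version B (the rewrite author's own statement) =====
-- stated objective: simpler
-- what changed: Single pass over motsfr: playability is decided by a closed-form Counter-style count comparison instead of A's greedy list-removal loop, each word's value is computed once while tracking the running maximum, and the result is a final filter of the scored list - eliminating A's meilleur_mot call and its double re-scan/re-evaluation of the playable words.
import Mathlib
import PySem

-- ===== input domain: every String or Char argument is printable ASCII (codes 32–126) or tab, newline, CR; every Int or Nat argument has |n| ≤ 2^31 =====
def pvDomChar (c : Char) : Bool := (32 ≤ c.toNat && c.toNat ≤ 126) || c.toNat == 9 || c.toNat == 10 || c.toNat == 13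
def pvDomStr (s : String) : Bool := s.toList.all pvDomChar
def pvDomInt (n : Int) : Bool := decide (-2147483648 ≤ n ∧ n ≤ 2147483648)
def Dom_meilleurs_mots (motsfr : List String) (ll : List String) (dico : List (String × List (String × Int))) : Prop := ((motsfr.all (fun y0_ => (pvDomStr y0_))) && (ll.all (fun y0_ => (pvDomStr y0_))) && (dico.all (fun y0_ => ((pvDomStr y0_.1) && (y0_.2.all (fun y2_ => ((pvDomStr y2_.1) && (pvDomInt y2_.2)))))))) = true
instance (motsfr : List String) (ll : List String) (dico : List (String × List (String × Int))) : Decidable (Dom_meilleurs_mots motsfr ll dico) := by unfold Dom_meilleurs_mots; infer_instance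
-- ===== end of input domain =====

-- B replaces A's meilleur_mot call and its double re-scan by one scoring pass plus a final filter (simpler decomposition; same results).


-- shared primitives: a Python string iterates as 1-char strings; dico[c]['val'] is a first-match
-- association-list lookup (total with default 0; Pre_ guarantees the keys are present, so the default is never used)
def pvChars (mot : String) : List String := mot.toList.map (fun c => String.singleton c)

def pvVal (dico : List (String × List (String × Int))) (c : String) : Int :=
  match dico.find? (fun p => p.1 == c) with
  | none => 0
  | some p =>
    match p.2.find? (fun q => q.1 == "val") with
    | none => 0
    | some q => q.2

-- ===== PORT A =====
def mot_jouable (mot : String) (ll : List String) : Bool :=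
  let cs := pvChars mot
  let st := cs.foldl (fun (st : List String × Bool × Nat) c =>
      let possible := st.2.1 && decide (c ∈ st.1)
      if c ∈ st.1 then (st.1.erase c, possible, st.2.2)
      else (st.1, possible, st.2.2 + 1))
    (ll, decide (cs.length ≤ ll.length), 0)
  if st.2.2 ≤ PySem.List.count ll "?" then decide (cs.length ≤ ll.length) else st.2.1

def mots_jouables (motsfr : List String) (ll : List String) : List String :=
  motsfr.foldl (fun acc e => if mot_jouable e ll then acc ++ [e] else acc) []

def valeur_mot (mot : String) (dico : List (String × List (String × Int))) : Int :=
  (pvChars mot).foldl (fun val c => val + pvVal dico c)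
    (if mot.toList.length = 7 then (50 : Int) else 0)

def meilleur_mot (motsfr : List String) (ll : List String) (dico : List (String × List (String × Int))) : String :=
  ((mots_jouables motsfr ll).foldl (fun (st : String × Int) mot =>
      let valmot := valeur_mot mot dico
      if valmot > st.2 then (mot, valmot) else st) ("", 0)).1

def meilleurs_mots (motsfr : List String) (ll : List String) (dico : List (String × List (String × Int))) : List String :=
  let meilleurmot := meilleur_mot motsfr ll dico
  if meilleurmot ≠ "" then
    let motsjouables := mots_jouables motsfr ll
    let valmeilleurmot := valeur_mot meilleurmot dico
    motsjouables.foldl (fun res mot => if valeur_mot mot dico == valmeilleurmot then res ++ [mot] else res) []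
  else []

-- ===== PORT B =====
def meilleurs_mots_alt (motsfr : List String) (ll : List String) (dico : List (String × List (String × Int))) : List String :=
  let jokers := PySem.List.count ll "?"
  let n := ll.length
  let st := motsfr.foldl (fun (st : Int × List (String × Int)) mot =>
      let cs := pvChars mot
      if cs.length > n then st
      else if ((PySem.List.dedup cs).map (fun c =>
          max 0 ((PySem.List.count cs c : Int) - (PySem.List.count ll c : Int)))).sum > (jokers : Int) then st
      else
        let val := (cs.map (fun c => pvVal dico c)).sum + (if cs.length = 7 then (50 : Int) else 0)
        ((if val > st.1 then val else st.1), st.2 ++ [(mot, val)]))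
    ((0 : Int), ([] : List (String × Int)))
  if st.1 > 0 then (st.2.filter (fun p => p.2 == st.1)).map (fun p => p.1) else []

-- ===== PRECONDITION & SPEC =====
-- closed-form count of letters a word needs beyond the hand (what the jokers must cover)
def pvMissing (cs : List String) (ll : List String) : Nat :=
  ((PySem.List.dedup cs).map (fun c => PySem.List.count cs c - PySem.List.count ll c)).sum

def pvHasVal (dico : List (String × List (String × Int))) (c : String) : Bool :=
  match dico.find? (fun p => p.1 == c) with
  | none => false
  | some p => p.2.any (fun q => q.1 == "val")

-- Pre_ excludes exactly the inputs where Python A raises KeyError: some playable word contains a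
-- letter with no dico entry (or whose entry lacks the 'val' key).
def Pre_meilleurs_mots (motsfr : List String) (ll : List String) (dico : List (String × List (String × Int))) : Prop :=
  ∀ mot ∈ motsfr,
    (pvChars mot).length ≤ ll.length ∧ pvMissing (pvChars mot) ll ≤ PySem.List.count ll "?" →
    ∀ c ∈ pvChars mot, pvHasVal dico c = true
instance (motsfr : List String) (ll : List String) (dico : List (String × List (String × Int))) : Decidable (Pre_meilleurs_mots motsfr ll dico) := by unfold Pre_meilleurs_mots; infer_instance

def pvWitness_meilleurs_mots : List String × List String × (List (String × List (String × Int))) :=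
  (["a", "ab"], ["a", "b", "?"], [("a", [("val", 1)]), ("b", [("val", 3)])])

def Spec_meilleurs_mots (motsfr : List String) (ll : List String) (dico : List (String × List (String × Int))) (out : List String) : Prop := out = meilleurs_mots_alt motsfr ll dico
instance (motsfr : List String) (ll : List String) (dico : List (String × List (String × Int))) (out : List String) : Decidable (Spec_meilleurs_mots motsfr ll dico out) := by unfold Spec_meilleurs_mots; infer_instance

-- ===== CLAIM (what is proved, stated in full; the proofs are below) =====
def Claim_equal_meilleurs_mots : Prop := ∀ (motsfr : List String) (ll : List String) (dico : List (String × List (String × Int))), Dom_meilleurs_mots motsfr ll dico → Pre_meilleurs_mots motsfr ll dico → Spec_meilleurs_mots motsfr ll dico (meilleurs_mots motsfr ll dico)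

-- ===== LEMMAS AND PROOFS =====

def pvN : List String → List String → Nat
  | [], _ => 0
  | c :: cs, l => if c ∈ l then pvN cs (l.erase c) else pvN cs l + 1

def pvRem : List String → List String → List String
  | [], l => l
  | c :: cs, l => if c ∈ l then pvRem cs (l.erase c) else pvRem cs l

theorem pvN_finset (cs : List String) (l : List String) :
    pvN cs l = ∑ c ∈ cs.toFinset, (cs.count c - l.count c) := by
  induction cs generalizing l with
  | nil => simp [pvN]
  | cons c cs ih =>
    rw [List.toFinset_cons]
    by_cases hc : c ∈ l
    · rw [pvN, if_pos hc, ih]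
      have hlc : 0 < l.count c := List.count_pos_iff.mpr hc
      by_cases hcs : c ∈ cs.toFinset
      · rw [Finset.insert_eq_self.2 hcs]
        apply Finset.sum_congr rfl
        intro d _
        rw [List.count_cons, List.count_erase]
        by_cases hdc : c = d
        · subst hdc; simp; omega
        · simp [beq_eq_false_iff_ne.mpr hdc]
      · rw [Finset.sum_insert hcs]
        have hcc : cs.count c = 0 := by
          rw [List.count_eq_zero]; simpa using hcs
        have h0 : (c :: cs).count c - l.count c = 0 := by
          rw [List.count_cons]; simp [hcc]; omega
        rw [h0, Nat.zero_add]
        apply Finset.sum_congr rfl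
        intro d hd
        have hdc : c ≠ d := fun h => hcs (h ▸ hd)
        rw [List.count_cons, List.count_erase]
        simp [beq_eq_false_iff_ne.mpr hdc]
    · rw [pvN, if_neg hc, ih]
      have hlc : l.count c = 0 := by rw [List.count_eq_zero]; exact hc
      have hstep : ∀ d ∈ cs.toFinset ∪ {c}, (c :: cs).count d - l.count d
          = (cs.count d - l.count d) + (if d = c then 1 else 0) := by
        intro d _
        rw [List.count_cons]
        by_cases hdc : c = d
        · subst hdc; simp [hlc]
        · simp [beq_eq_false_iff_ne.mpr hdc, Ne.symm hdc]
      by_cases hcs : c ∈ cs.toFinset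
      · rw [Finset.insert_eq_self.2 hcs]
        rw [Finset.sum_congr rfl (fun d hd => hstep d (Finset.mem_union_left _ hd)),
          Finset.sum_add_distrib, Finset.sum_ite_eq' cs.toFinset c (fun _ => 1), if_pos hcs]
      · rw [Finset.sum_insert hcs]
        have hcc : cs.count c = 0 := by rw [List.count_eq_zero]; simpa using hcs
        rw [hstep c (Finset.mem_union_right _ (by simp))]
        rw [Finset.sum_congr rfl (fun d hd => hstep d (Finset.mem_union_left _ hd)),
          Finset.sum_add_distrib, Finset.sum_ite_eq' cs.toFinset c (fun _ => 1), if_neg hcs]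
        simp [hcc, hlc]
        omega

theorem sum_dedup_toFinset (cs : List String) (f : String → Nat) :
    ((PySem.List.dedup cs).map f).sum = ∑ c ∈ cs.toFinset, f c := by
  have h1 : (PySem.List.dedup cs).toFinset = cs.toFinset := by
    ext x; simp
  rw [← h1, List.sum_toFinset _ (PySem.List.nodup_dedup cs)]

theorem pvMissing_eq_pvN (cs : List String) (ll : List String) :
    pvMissing cs ll = pvN cs ll := by
  unfold pvMissing
  simp only [PySem.List.count_eq]
  rw [sum_dedup_toFinset, pvN_finset]

theorem sum_cast_sub (d : List String) (f g : String → Nat) :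
    (d.map (fun c => max 0 ((f c : Int) - (g c : Int)))).sum
      = ((d.map (fun c => f c - g c)).sum : Int) := by
  induction d with
  | nil => rfl
  | cons a d ih =>
    simp only [List.map_cons, List.sum_cons, Nat.cast_add, ← ih]
    have hmax : max 0 ((f a : Int) - g a) = ((f a - g a : Nat) : Int) := by omega
    rw [hmax]

theorem int_missing_eq_pvN (cs : List String) (ll : List String) :
    ((PySem.List.dedup cs).map (fun c =>
        max 0 ((PySem.List.count cs c : Int) - (PySem.List.count ll c : Int)))).sum
      = (pvN cs ll : Int) := by
  rw [sum_cast_sub, ← pvMissing_eq_pvN]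
  rfl

theorem foldl_jouable (cs : List String) (l : List String) (p : Bool) (nb : Nat) :
    cs.foldl (fun (st : List String × Bool × Nat) c =>
      if c ∈ st.1 then (st.1.erase c, st.2.1 && decide (c ∈ st.1), st.2.2)
      else (st.1, st.2.1 && decide (c ∈ st.1), st.2.2 + 1)) (l, p, nb)
    = (pvRem cs l, p && decide (pvN cs l = 0), nb + pvN cs l) := by
  induction cs generalizing l p nb with
  | nil => simp [pvRem, pvN]
  | cons c cs ih =>
    by_cases hc : c ∈ l
    · simp [hc, ih, pvN, pvRem]
    · simp [hc, ih, pvN, pvRem]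
      omega

theorem mot_jouable_eq (mot : String) (ll : List String) :
    mot_jouable mot ll
      = (decide ((pvChars mot).length ≤ ll.length)
         && decide (pvN (pvChars mot) ll ≤ ll.count "?")) := by
  simp only [mot_jouable]
  rw [foldl_jouable]
  dsimp only
  rw [Nat.zero_add, PySem.List.count_eq]
  by_cases h : pvN (pvChars mot) ll ≤ ll.count "?"
  · rw [if_pos h]
    simp [h]
  · rw [if_neg h]
    have hne : ¬ (pvN (pvChars mot) ll = 0) := by omega
    simp [h, hne]

theorem valeur_shape (mot : String) (dico : List (String × List (String × Int))) :
    valeur_mot mot dico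
      = ((pvChars mot).map (fun c => pvVal dico c)).sum
        + (if (pvChars mot).length = 7 then (50 : Int) else 0) := by
  unfold valeur_mot
  rw [PySem.List.foldl_add]
  have hlen : (pvChars mot).length = mot.toList.length := by simp [pvChars]
  rw [hlen, add_comm]

theorem valeur_empty (dico : List (String × List (String × Int))) :
    valeur_mot "" dico = 0 := by
  simp [valeur_mot, pvChars]

theorem mots_jouables_eq (motsfr : List String) (ll : List String) :
    mots_jouables motsfr ll = motsfr.filter (fun m => mot_jouable m ll) := by
  unfold mots_jouables
  rw [PySem.List.foldl_append_if (fun m => mot_jouable m ll) (fun x => x)]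
  simp

theorem bm_fold (dico : List (String × List (String × Int))) (J : List String) :
    ∀ (r : String) (b : Int), 0 ≤ b →
      (let st := J.foldl (fun (st : String × Int) mot =>
          if valeur_mot mot dico > st.2 then (mot, valeur_mot mot dico) else st) (r, b)
       b ≤ st.2
       ∧ ((0 < st.2 ∧ valeur_mot st.1 dico = st.2) ∨ (st.1 = r ∧ st.2 = b))
       ∧ st.2 = J.foldl (fun cur m => if valeur_mot m dico > cur then valeur_mot m dico else cur) b) := by
  induction J with
  | nil => intro r b hb; exact ⟨le_refl _, Or.inr ⟨rfl, rfl⟩, rfl⟩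
  | cons m J ih =>
    intro r b hb
    by_cases hm : valeur_mot m dico > b
    · have h := ih m (valeur_mot m dico) (le_of_lt (lt_of_le_of_lt hb hm))
      simp only [List.foldl_cons, if_pos hm]
      refine ⟨le_trans (le_of_lt hm) h.1, ?_, h.2.2⟩
      rcases h.2.1 with h2 | ⟨h2, h3⟩
      · exact Or.inl h2
      · exact Or.inl ⟨by rw [h3]; exact lt_of_le_of_lt hb hm, by rw [h2, h3]⟩
    · have h := ih r b hb
      simp only [List.foldl_cons, if_neg hm]
      exact h

theorem filter_snd_map (J : List String) (v : String → Int) (M : Int) :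
    ((J.map (fun m => (m, v m))).filter (fun p => p.2 == M)).map (fun p => p.1)
      = J.filter (fun m => v m == M) := by
  induction J with
  | nil => rfl
  | cons m J ih =>
    by_cases h : v m == M
    · simp only [List.map_cons, List.filter_cons, h]; simp [ih]
    · simp only [List.map_cons, List.filter_cons, h]; simp [ih]

theorem b_fold (ll : List String) (dico : List (String × List (String × Int))) (motsfr : List String) :
    ∀ (b : Int) (s : List (String × Int)),
      motsfr.foldl (fun (st : Int × List (String × Int)) mot =>
          if (pvChars mot).length > ll.length then st
          else if ((PySem.List.dedup (pvChars mot)).map (fun c =>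
              max 0 ((PySem.List.count (pvChars mot) c : Int) - (PySem.List.count ll c : Int)))).sum
              > (PySem.List.count ll "?" : Int) then st
          else ((if ((pvChars mot).map (fun c => pvVal dico c)).sum + (if (pvChars mot).length = 7 then (50 : Int) else 0) > st.1
                 then ((pvChars mot).map (fun c => pvVal dico c)).sum + (if (pvChars mot).length = 7 then (50 : Int) else 0)
                 else st.1),
                st.2 ++ [(mot, ((pvChars mot).map (fun c => pvVal dico c)).sum + (if (pvChars mot).length = 7 then (50 : Int) else 0))])) (b, s)
      = ((motsfr.filter (fun m => mot_jouable m ll)).foldl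
            (fun cur m => if valeur_mot m dico > cur then valeur_mot m dico else cur) b,
         s ++ (motsfr.filter (fun m => mot_jouable m ll)).map (fun m => (m, valeur_mot m dico))) := by
  induction motsfr with
  | nil => intro b s; simp
  | cons mot motsfr ih =>
    intro b s
    rw [List.foldl_cons, List.filter_cons]
    have hcnt : ((PySem.List.count ll "?" : Nat) : Int) = ((ll.count "?" : Nat) : Int) := by
      rw [PySem.List.count_eq]
    by_cases h1 : (pvChars mot).length > ll.length
    · have hj : mot_jouable mot ll = false := by
        rw [mot_jouable_eq]
        simp only [Bool.and_eq_false_iff, decide_eq_false_iff_not]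
        left; omega
      rw [if_pos h1]
      simp only [hj, Bool.false_eq_true, if_false]
      exact ih b s
    · by_cases h2 : ((PySem.List.dedup (pvChars mot)).map (fun c =>
          max 0 ((PySem.List.count (pvChars mot) c : Int) - (PySem.List.count ll c : Int)))).sum
          > (PySem.List.count ll "?" : Int)
      · have h2' := h2
        rw [int_missing_eq_pvN, hcnt] at h2'
        have hj : mot_jouable mot ll = false := by
          rw [mot_jouable_eq]
          simp only [Bool.and_eq_false_iff, decide_eq_false_iff_not]
          right; omega
        rw [if_neg h1, if_pos h2]
        simp only [hj, Bool.false_eq_true, if_false]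
        exact ih b s
      · have h2' := h2
        rw [int_missing_eq_pvN, hcnt] at h2'
        have hj : mot_jouable mot ll = true := by
          rw [mot_jouable_eq]
          simp only [Bool.and_eq_true, decide_eq_true_eq]
          constructor
          · omega
          · omega
        rw [if_neg h1, if_neg h2]
        simp only [hj, if_true]
        rw [ih]
        rw [← valeur_shape mot dico, List.foldl_cons]
        simp [List.append_assoc]


-- ===== VERDICT (by name: the statement is the Claim_ definition above) =====
theorem meilleurs_mots_spec : Claim_equal_meilleurs_mots := by
  intro motsfr ll dico _ _
  simp only [Spec_meilleurs_mots, meilleurs_mots, meilleurs_mots_alt, meilleur_mot, mots_jouables_eq]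
  rw [b_fold]
  set J := motsfr.filter (fun m => mot_jouable m ll) with hJ
  have h := bm_fold dico J "" 0 (le_refl 0)
  set st := J.foldl (fun (st : String × Int) mot =>
      if valeur_mot mot dico > st.2 then (mot, valeur_mot mot dico) else st) ("", 0) with hst
  obtain ⟨hle, hdis, hbest⟩ := h
  dsimp only
  rw [← hbest, List.nil_append]
  by_cases hz : st.2 = 0
  · have hr : st.1 = "" := by
      rcases hdis with ⟨h1, _⟩ | ⟨h1, _⟩
      · omega
      · exact h1
    rw [hz] at *
    simp [hr]
  · have hpos : 0 < st.2 := lt_of_le_of_ne hle (fun h => hz h.symm)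
    rcases hdis with ⟨_, hval⟩ | ⟨_, h2⟩
    · have hne : st.1 ≠ "" := by
        intro h
        rw [h, valeur_empty] at hval
        omega
      rw [if_pos hne, if_pos hpos, hval]
      rw [PySem.List.foldl_append_if (fun mot => valeur_mot mot dico == st.2) (fun x => x)]
      rw [filter_snd_map]
      simp
    · omega
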